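-- pv_equiv track=rewrite | github.com/siebeniris/CPD | topic_modeling/bert_sentiment_analysis.py | review_sent_tokenize
-- ===== SOURCE A (Python) =====
-- def review_sent_tokenize(review):
--     """
--     Sentenized the reviews.
--     :param review:
--     :return:
--     """
--     countries = ['Netherlands', 'Italy', 'France', 'Austria', 'Spain', 'United Kingdom']
--     locations = ['Amsterdam', 'Barcelona', 'Paris', 'Vienna', 'Milan']
--     months = ['January', 'February', 'March', 'April', 'May', 'June', 'July', 'August', 'September', 'October',
--               'November', 'December', 'Jan.', 'Jan', 'Feb.', 'Feb', 'Mar.', 'Mar', 'Apr.', 'Apr', 'Jun.', 'Jun',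
--                     'Jul', 'Jul.', 'Aug.', 'Aug', 'Sep', 'Sep.', 'Oct.', 'Oct', 'Nov.', 'Nov',
--                     'Dec.', 'Dec']
--     week = ['Monday', 'Tuesday', 'Wednesday', 'Thursday', 'Friday', 'Saturday', 'Sunday',
--            'Mon.', 'Tue.', 'Wed.', 'Thu.', 'Fri.', 'Sat.', 'Sun.']
--
--     doc = review.strip().split()
--     upper_idx = []
--     for idx, word in enumerate(doc):
--         if word.istitle():
--             if word not in countries + ['United', 'Kingdom'] + locations + months + week:
--                 upper_idx.append(idx)
--
--     sents = []
--     if len(doc) > 1: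
--         if len(upper_idx) > 1:
--             for ind, indice in enumerate(upper_idx[:-1]):
--                 sent = doc[indice:upper_idx[ind + 1]]
--                 if len(sent) > 2:
--                     sents.append(' '.join(sent))
--             sent = doc[upper_idx[-1]:]
--             if len(sent) > 2:
--                 sents.append(' '.join(sent))
--         else:
--             sents.append(' '.join(doc))
--
--     return sents
-- ===== SOURCE B (Python) =====
-- def review_sent_tokenize(review):
--     """Sentenized the reviews (streaming single-pass re-implementation)."""
--     entities = {'Netherlands', 'Italy', 'France', 'Austria', 'Spain', 'United Kingdom',
--                 'United', 'Kingdom',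
--                 'Amsterdam', 'Barcelona', 'Paris', 'Vienna', 'Milan',
--                 'January', 'February', 'March', 'April', 'May', 'June', 'July', 'August',
--                 'September', 'October', 'November', 'December', 'Jan.', 'Jan', 'Feb.', 'Feb',
--                 'Mar.', 'Mar', 'Apr.', 'Apr', 'Jun.', 'Jun', 'Jul', 'Jul.', 'Aug.', 'Aug',
--                 'Sep', 'Sep.', 'Oct.', 'Oct', 'Nov.', 'Nov', 'Dec.', 'Dec',
--                 'Monday', 'Tuesday', 'Wednesday', 'Thursday', 'Friday', 'Saturday', 'Sunday',
--                 'Mon.', 'Tue.', 'Wed.', 'Thu.', 'Fri.', 'Sat.', 'Sun.'}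
--     doc = review.strip().split()
--     segments = []
--     cur = []
--     started = False
--     for word in doc:
--         if word.istitle() and word not in entities:
--             if started:
--                 segments.append(cur)
--             cur = [word]
--             started = True
--         elif started:
--             cur.append(word)
--     if started:
--         segments.append(cur)
--     if len(doc) <= 1:
--         return []
--     if len(segments) > 1:
--         return [' '.join(seg) for seg in segments if len(seg) > 2]
--     return [' '.join(doc)]
-- ===== Notes on version B (the rewrite author's own statement) =====
-- stated objective: alternative
-- what changed: B replaces A's two-phase index collection plus enumerate-and-reslice (doc[idx[i]:idx[i+1]]) with a single streaming pass over the words that maintains a current-segment list and a started flag, closing segments online.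
import Mathlib
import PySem

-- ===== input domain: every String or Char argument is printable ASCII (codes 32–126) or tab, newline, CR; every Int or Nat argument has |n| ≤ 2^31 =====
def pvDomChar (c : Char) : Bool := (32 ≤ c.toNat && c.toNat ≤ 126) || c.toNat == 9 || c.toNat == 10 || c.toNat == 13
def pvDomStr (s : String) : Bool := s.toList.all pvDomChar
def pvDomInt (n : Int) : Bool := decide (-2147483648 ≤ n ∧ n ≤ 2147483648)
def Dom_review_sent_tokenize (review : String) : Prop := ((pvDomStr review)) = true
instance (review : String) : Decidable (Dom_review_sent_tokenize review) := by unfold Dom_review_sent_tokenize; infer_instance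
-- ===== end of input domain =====

-- B replaces A's index-collecting + re-slicing with one streaming pass that maintains the
-- current segment and a started flag (objective: alternative decomposition, same cost).

-- ===== PORT A =====

-- str.istitle(), ported by hand (exact on the ASCII domain: 'cased' = ASCII letter)
def pvIstitleGo : List Char → Bool → Bool → Bool
  | [], _, cased => cased
  | c :: rest, prevCased, cased =>
    if PySem.Chars.isupper c then
      if prevCased then false else pvIstitleGo rest true true
    else if PySem.Chars.islower c then
      if !prevCased then false else pvIstitleGo rest true true
    else pvIstitleGo rest false cased

def pvIstitle (s : String) : Bool := pvIstitleGo s.toList false false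

def pvCountries : List String := ["Netherlands", "Italy", "France", "Austria", "Spain", "United Kingdom"]
def pvLocations : List String := ["Amsterdam", "Barcelona", "Paris", "Vienna", "Milan"]
def pvMonths : List String := ["January", "February", "March", "April", "May", "June", "July", "August",
  "September", "October", "November", "December", "Jan.", "Jan", "Feb.", "Feb", "Mar.", "Mar",
  "Apr.", "Apr", "Jun.", "Jun", "Jul", "Jul.", "Aug.", "Aug", "Sep", "Sep.", "Oct.", "Oct",
  "Nov.", "Nov", "Dec.", "Dec"]
def pvWeek : List String := ["Monday", "Tuesday", "Wednesday", "Thursday", "Friday", "Saturday", "Sunday",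
  "Mon.", "Tue.", "Wed.", "Thu.", "Fri.", "Sat.", "Sun."]

def review_sent_tokenize (review : String) : List String :=
  let doc := PySem.Str.split₀ (PySem.Str.strip review)
  let upper_idx : List Int :=
    (PySem.List.enumerate doc).foldl (fun acc p =>
      if pvIstitle p.2 then
        if !((pvCountries ++ ["United", "Kingdom"] ++ pvLocations ++ pvMonths ++ pvWeek).contains p.2)
        then acc ++ [p.1] else acc
      else acc) []
  if 1 < doc.length then
    if 1 < upper_idx.length then
      let sents :=
        (PySem.List.enumerate (PySem.List.slice upper_idx none (some (-1)))).foldl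
          (fun sents q =>
            let sent := PySem.List.slice doc (some q.2) (PySem.List.pyGet? upper_idx (q.1 + 1))
            if 2 < sent.length then sents ++ [PySem.Str.join " " sent] else sents) []
      let sent := PySem.List.slice doc (PySem.List.pyGet? upper_idx (-1)) none
      if 2 < sent.length then sents ++ [PySem.Str.join " " sent] else sents
    else [PySem.Str.join " " doc]
  else []

-- ===== PORT B =====

def pvEntities : PySem.Set String := PySem.Set.ofList
  (["Netherlands", "Italy", "France", "Austria", "Spain", "United Kingdom", "United", "Kingdom",
    "Amsterdam", "Barcelona", "Paris", "Vienna", "Milan",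
    "January", "February", "March", "April", "May", "June", "July", "August",
    "September", "October", "November", "December", "Jan.", "Jan", "Feb.", "Feb", "Mar.", "Mar",
    "Apr.", "Apr", "Jun.", "Jun", "Jul", "Jul.", "Aug.", "Aug", "Sep", "Sep.", "Oct.", "Oct",
    "Nov.", "Nov", "Dec.", "Dec",
    "Monday", "Tuesday", "Wednesday", "Thursday", "Friday", "Saturday", "Sunday",
    "Mon.", "Tue.", "Wed.", "Thu.", "Fri.", "Sat.", "Sun."])

-- B's boundary test: a capitalized word that is not a known entity
def pvB (w : String) : Bool := pvIstitle w && !(PySem.Set.contains pvEntities w)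

-- B's streaming for-loop over doc, state = (segments, cur, started)
def pvBLoop : List String → List (List String) → List String → Bool →
    List (List String) × List String × Bool
  | [], segs, cur, started => (segs, cur, started)
  | w :: ws, segs, cur, started =>
    if pvB w then
      pvBLoop ws (if started then segs ++ [cur] else segs) [w] true
    else if started then
      pvBLoop ws segs (cur ++ [w]) started
    else
      pvBLoop ws segs cur started

def review_sent_tokenize_alt (review : String) : List String :=
  let doc := PySem.Str.split₀ (PySem.Str.strip review)
  let r := pvBLoop doc [] [] false
  let segments := if r.2.2 then r.1 ++ [r.2.1] else r.1
  if doc.length ≤ 1 then []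
  else if 1 < segments.length then
    (segments.filter (fun seg => 2 < seg.length)).map (PySem.Str.join " ")
  else [PySem.Str.join " " doc]

-- ===== PRECONDITION & SPEC =====
def Spec_review_sent_tokenize (review : String) (out : List String) : Prop := out = review_sent_tokenize_alt review
instance (review : String) (out : List String) : Decidable (Spec_review_sent_tokenize review out) := by unfold Spec_review_sent_tokenize; infer_instance

-- ===== CLAIM (what is proved, stated in full; the proofs are below) =====
def Claim_equal_review_sent_tokenize : Prop := ∀ (review : String), Dom_review_sent_tokenize review → Spec_review_sent_tokenize review (review_sent_tokenize review)

-- ===== LEMMAS AND PROOFS =====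

-- clean relative boundary-index list (Nat positions)
def pvIdx0 : List String → List Nat
  | [] => []
  | w :: ws => if pvB w then 0 :: (pvIdx0 ws).map (· + 1) else (pvIdx0 ws).map (· + 1)

-- clean segment collector (B's semantics)
def pvGoSeg : List String → List String → List (List String)
  | [], cur => [cur]
  | w :: ws, cur => if pvB w then cur :: pvGoSeg ws [w] else pvGoSeg ws (cur ++ [w])

def pvSegsOf : List String → List (List String)
  | [] => []
  | w :: ws => if pvB w then pvGoSeg ws [w] else pvSegsOf ws

-- A's slices, on Nat indices
def pvSlicesOf (doc : List String) : List Nat → List (List String)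
  | [] => []
  | [i] => [doc.drop i]
  | i :: j :: r => (doc.drop i).take (j - i) :: pvSlicesOf doc (j :: r)

set_option maxRecDepth 10000 in
theorem pvSetContains_eq (w : String) :
    PySem.Set.contains pvEntities w =
      (pvCountries ++ ["United", "Kingdom"] ++ pvLocations ++ pvMonths ++ pvWeek).contains w := by
  rfl

-- A's enumerate/foldl index collection computes pvIdx0 (shifted by the start)
theorem pvIdxFold (ws : List String) : ∀ (k : Nat) (acc : List Int),
    (PySem.List.enumerate ws (k : Int)).foldl (fun acc p =>
      if pvIstitle p.2 then
        if !((pvCountries ++ ["United", "Kingdom"] ++ pvLocations ++ pvMonths ++ pvWeek).contains p.2)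
        then acc ++ [p.1] else acc
      else acc) acc
    = acc ++ (pvIdx0 ws).map (fun n => ((k + n : Nat) : Int)) := by
  induction ws with
  | nil => intro k acc; simp [PySem.List.enumerate, pvIdx0]
  | cons w ws ih =>
    intro k acc
    simp only [PySem.List.enumerate, List.foldl]
    have hif : (if pvIstitle w then
        if !((pvCountries ++ ["United", "Kingdom"] ++ pvLocations ++ pvMonths ++ pvWeek).contains w)
        then acc ++ [(k : Int)] else acc
      else acc) = if pvB w then acc ++ [(k : Int)] else acc := by
      rw [← pvSetContains_eq]
      cases hi : pvIstitle w <;> cases hc : PySem.Set.contains pvEntities w <;>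
        simp only [pvB, hi, hc, Bool.not_true, Bool.not_false, Bool.and_true,
          Bool.and_false] <;> simp
    rw [hif]
    have hk1 : ((k : Int) + 1) = ((k + 1 : Nat) : Int) := by push_cast; ring
    rw [hk1]
    by_cases hb : pvB w = true
    · rw [if_pos hb, ih (k + 1), pvIdx0, if_pos hb]
      simp only [List.map_cons, List.map_map, List.append_assoc, List.cons_append,
        Nat.add_zero]
      congr 2
      apply List.map_congr_left
      intro n _
      simp only [Function.comp_apply]
      congr 1
      omega
    · rw [if_neg hb, ih (k + 1), pvIdx0, if_neg hb]
      simp only [List.map_map]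
      congr 1
      apply List.map_congr_left
      intro n _
      simp only [Function.comp_apply]
      congr 1
      omega

-- B's loop, closed with the final flush, computes pvGoSeg / pvSegsOf
theorem pvBLoopGo (ws : List String) : ∀ (segs : List (List String)) (cur : List String),
    (let r := pvBLoop ws segs cur true; if r.2.2 then r.1 ++ [r.2.1] else r.1)
      = segs ++ pvGoSeg ws cur := by
  induction ws with
  | nil => intro segs cur; simp [pvBLoop, pvGoSeg]
  | cons w ws ih =>
    intro segs cur
    rw [pvBLoop, pvGoSeg]
    by_cases hb : pvB w = true
    · rw [if_pos hb, if_pos hb]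
      simp only [if_true]
      rw [ih]
      simp
    · rw [if_neg hb, if_neg hb]
      simp only [if_true]
      rw [ih]

theorem pvBLoopClosed (ws : List String) : ∀ (segs : List (List String)),
    (let r := pvBLoop ws segs [] false; if r.2.2 then r.1 ++ [r.2.1] else r.1)
      = segs ++ pvSegsOf ws := by
  induction ws with
  | nil => intro segs; simp [pvBLoop, pvSegsOf]
  | cons w ws ih =>
    intro segs
    rw [pvBLoop, pvSegsOf]
    by_cases hb : pvB w = true
    · rw [if_pos hb, if_pos hb]
      simp only [Bool.false_eq_true, if_false]
      rw [pvBLoopGo]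
    · rw [if_neg hb, if_neg hb]
      simp only [Bool.false_eq_true, if_false]
      rw [ih]

theorem pvGoSeg_length (ws : List String) : ∀ (cur : List String),
    (pvGoSeg ws cur).length = 1 + (pvIdx0 ws).length := by
  induction ws with
  | nil => intro cur; simp [pvGoSeg, pvIdx0]
  | cons w ws ih =>
    intro cur
    simp only [pvGoSeg, pvIdx0]
    by_cases hb : pvB w = true
    · rw [if_pos hb, if_pos hb]; simp [ih]; omega
    · rw [if_neg hb, if_neg hb, ih]; simp

theorem pvSegsOf_length' (ws : List String) :
    (pvSegsOf ws).length = (pvIdx0 ws).length := by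
  induction ws with
  | nil => simp [pvSegsOf, pvIdx0]
  | cons w ws ih =>
    simp only [pvSegsOf, pvIdx0]
    by_cases hb : pvB w = true
    · rw [if_pos hb, if_pos hb, pvGoSeg_length]; simp [Nat.add_comm]
    · rw [if_neg hb, if_neg hb, ih]; simp

-- structure lemmas for the main slice correspondence
theorem pvGoSeg_of_idx_nil (ws : List String) : ∀ (cur : List String),
    pvIdx0 ws = [] → pvGoSeg ws cur = [cur ++ ws] := by
  induction ws with
  | nil => intro cur _; simp [pvGoSeg]
  | cons w ws ih =>
    intro cur h
    simp only [pvIdx0] at h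
    by_cases hb : pvB w = true
    · rw [if_pos hb] at h; simp at h
    · rw [if_neg hb] at h
      simp only [pvGoSeg, if_neg hb]
      rw [ih (cur ++ [w]) (by simpa using h)]
      simp

theorem pvSegsOf_of_idx_nil (ws : List String) (h : pvIdx0 ws = []) : pvSegsOf ws = [] := by
  induction ws with
  | nil => simp [pvSegsOf]
  | cons w ws ih =>
    simp only [pvIdx0] at h
    by_cases hb : pvB w = true
    · rw [if_pos hb] at h; simp at h
    · rw [if_neg hb] at h
      simp only [pvSegsOf, if_neg hb]
      exact ih (by simpa using h)

theorem pvGoSeg_of_idx_cons (ws : List String) : ∀ (j : Nat) (r : List Nat) (cur : List String),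
    pvIdx0 ws = j :: r → pvGoSeg ws cur = (cur ++ ws.take j) :: pvSegsOf ws := by
  induction ws with
  | nil => intro j r cur h; simp [pvIdx0] at h
  | cons w ws ih =>
    intro j r cur h
    simp only [pvIdx0] at h
    by_cases hb : pvB w = true
    · rw [if_pos hb] at h
      obtain ⟨hj, _⟩ := List.cons.inj h
      simp only [pvGoSeg, pvSegsOf, if_pos hb, ← hj, List.take_zero, List.append_nil]
    · rw [if_neg hb] at h
      rcases hw : pvIdx0 ws with _ | ⟨j', r'⟩
      · rw [hw] at h; simp at h
      · rw [hw] at h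
        simp only [List.map_cons] at h
        obtain ⟨hj, _⟩ := List.cons.inj h
        simp only [pvGoSeg, pvSegsOf, if_neg hb]
        rw [ih j' r' (cur ++ [w]) hw, ← hj]
        simp

theorem pvSlicesOf_shift (w : String) (ws : List String) (l : List Nat) :
    pvSlicesOf (w :: ws) (l.map (· + 1)) = pvSlicesOf ws l := by
  induction l with
  | nil => simp [pvSlicesOf]
  | cons i l ih =>
    rcases l with _ | ⟨j, r⟩
    · simp [pvSlicesOf]
    · simp only [List.map_cons] at *
      simp only [pvSlicesOf]
      rw [ih]
      congr 1
      simp only [List.drop_succ_cons]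
      congr 1
      omega

-- MAIN: the segments are exactly A's slices at the boundary indices
theorem pvSegsOf_eq_slices (doc : List String) :
    pvIdx0 doc ≠ [] → pvSegsOf doc = pvSlicesOf doc (pvIdx0 doc) := by
  induction doc with
  | nil => intro h; simp [pvIdx0] at h
  | cons w ws ih =>
    intro _
    simp only [pvIdx0, pvSegsOf]
    by_cases hb : pvB w = true
    · rw [if_pos hb, if_pos hb]
      rcases hw : pvIdx0 ws with _ | ⟨j, r⟩
      · rw [pvGoSeg_of_idx_nil ws [w] hw]
        simp [pvSlicesOf]
      · rw [pvGoSeg_of_idx_cons ws j r [w] hw]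
        have hmap : (0 : Nat) :: ((j :: r).map (· + 1)) = 0 :: ((j + 1) :: r.map (· + 1)) := by
          simp
        rw [hmap]
        simp only [pvSlicesOf]
        have h2 : ((j + 1) :: r.map (· + 1)) = ((j :: r).map (· + 1)) := by simp
        rw [h2, pvSlicesOf_shift]
        have h3 := ih (by rw [hw]; simp)
        rw [hw] at h3
        rw [h3]
        simp
    · rw [if_neg hb, if_neg hb, pvSlicesOf_shift]
      rcases hw : pvIdx0 ws with _ | ⟨j, r⟩
      · simp [pvSegsOf_of_idx_nil ws hw, pvSlicesOf]
      · have h3 := ih (by rw [hw]; simp)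
        rw [hw] at h3
        exact h3

theorem pvGetNeg1 (xs : List Int) (h : xs ≠ []) :
    PySem.List.pyGet? xs (-1) = some (xs.getLast h) := by
  have hl : 1 ≤ xs.length := List.length_pos_iff.mpr h
  have hlt : xs.length - 1 < xs.length := by omega
  simp only [PySem.List.pyGet?, PySem.List.pyIdx?]
  norm_num [hl]
  rw [List.getElem?_eq_getElem hlt, List.getLast_eq_getElem]

theorem pvSliceNeg1 (xs : List Int) :
    PySem.List.slice xs none (some (-1)) = xs.dropLast := by
  simp [PySem.List.slice, List.dropLast_eq_take]

-- A's pair-slicing loop plus the final segment, generalized over the start position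
theorem pvALoopGen (doc : List String) (l0 : List Nat) (hl : l0 ≠ []) :
    ∀ (n k : Nat), k + n + 1 = l0.length → ∀ (acc : List String),
    (let U := l0.map (fun i => ((i : Nat) : Int));
     let sents := (PySem.List.enumerate (U.dropLast.drop k) (k : Int)).foldl
       (fun sents q =>
         let sent := PySem.List.slice doc (some q.2) (PySem.List.pyGet? U (q.1 + 1));
         if 2 < sent.length then sents ++ [PySem.Str.join " " sent] else sents) acc;
     let sent := PySem.List.slice doc (PySem.List.pyGet? U (-1)) none;
     if 2 < sent.length then sents ++ [PySem.Str.join " " sent] else sents)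
    = acc ++ ((pvSlicesOf doc (l0.drop k)).filter (fun s => 2 < s.length)).map
        (PySem.Str.join " ") := by
  intro n
  induction n with
  | zero =>
    intro k hk acc
    have hU : l0.map (fun i => ((i : Nat) : Int)) ≠ [] := by
      simp only [ne_eq, List.map_eq_nil_iff]; exact hl
    have hdrop : (l0.map (fun i => ((i : Nat) : Int))).dropLast.drop k = [] := by
      apply List.drop_eq_nil_of_le
      simp; omega
    have hk1 : k < l0.length := by omega
    have hlast : (l0.map (fun i => ((i : Nat) : Int))).getLast hU = ((l0[k] : Nat) : Int) := by
      rw [List.getLast_eq_getElem]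
      simp only [List.getElem_map, List.length_map]
      have hek : l0.length - 1 = k := by omega
      simp [hek]
    have hdk : l0.drop k = [l0[k]] := by
      rw [List.drop_eq_getElem_cons hk1, List.drop_eq_nil_of_le (by omega)]
    simp only [hdrop, PySem.List.enumerate, List.foldl_nil, pvGetNeg1 _ hU, hlast,
      PySem.List.slice_from _ (by positivity : (0:Int) ≤ ((l0[k] : Nat) : Int)), hdk,
      pvSlicesOf, Int.toNat_natCast]
    by_cases h2 : 2 < doc.length - l0[k]
    · rw [if_pos (by simpa using h2)]
      simp [List.filter, h2]
    · rw [if_neg (by simpa using h2)]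
      simp [List.filter, h2]
  | succ n ihn =>
    intro k hk acc
    have hk1 : k < (l0.map (fun i => ((i : Nat) : Int))).dropLast.length := by
      simp; omega
    have hkl : k < l0.length := by omega
    have hkl1 : k + 1 < l0.length := by omega
    have hcons : (l0.map (fun i => ((i : Nat) : Int))).dropLast.drop k
        = ((l0[k] : Nat) : Int) :: (l0.map (fun i => ((i : Nat) : Int))).dropLast.drop (k + 1) := by
      rw [List.drop_eq_getElem_cons hk1]
      congr 1
      rw [List.getElem_dropLast]
      simp
    have hget : PySem.List.pyGet? (l0.map (fun i => ((i : Nat) : Int))) ((k + 1 : Nat) : Int)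
        = some ((l0[k + 1] : Nat) : Int) := by
      rw [PySem.List.pyGet?_natCast,
        List.getElem?_eq_getElem (by simpa using hkl1)]
      simp
    have hstep : ((k : Int) + 1) = ((k + 1 : Nat) : Int) := by push_cast; ring
    have hdk : l0.drop k = l0[k] :: l0[k + 1] :: l0.drop (k + 2) := by
      rw [List.drop_eq_getElem_cons hkl, List.drop_eq_getElem_cons hkl1]
    have hdk1 : l0.drop (k + 1) = l0[k + 1] :: l0.drop (k + 2) := by
      rw [List.drop_eq_getElem_cons hkl1]
    simp only [hcons, PySem.List.enumerate, List.foldl_cons, hstep]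
    rw [hget, PySem.List.slice_natCast]
    rw [ihn (k + 1) (by omega), hdk, hdk1]
    have hsl : pvSlicesOf doc (l0[k] :: l0[k + 1] :: l0.drop (k + 2))
        = (List.take (l0[k + 1] - l0[k]) (List.drop l0[k] doc))
            :: pvSlicesOf doc (l0[k + 1] :: l0.drop (k + 2)) := rfl
    rw [hsl]
    by_cases h2 : 2 < l0[k + 1] - l0[k] ∧ 2 < doc.length - l0[k]
    · simp [h2]
    · simp [h2]

theorem pvIdxFold0 (ws : List String) :
    (PySem.List.enumerate ws).foldl (fun acc p =>
      if pvIstitle p.2 then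
        if !((pvCountries ++ ["United", "Kingdom"] ++ pvLocations ++ pvMonths ++ pvWeek).contains p.2)
        then acc ++ [p.1] else acc
      else acc) []
    = (pvIdx0 ws).map (fun i => ((i : Nat) : Int)) := by
  have h := pvIdxFold ws 0 []
  simpa using h

set_option maxHeartbeats 2000000 in
theorem pvMain (review : String) :
    review_sent_tokenize review = review_sent_tokenize_alt review := by
  unfold review_sent_tokenize review_sent_tokenize_alt
  dsimp only
  rw [pvIdxFold0, pvBLoopClosed]
  set doc := PySem.Str.split₀ (PySem.Str.strip review) with hdoc
  set l := pvIdx0 doc with hl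
  simp only [List.length_map, List.nil_append]
  by_cases hd : 1 < doc.length
  · rw [if_pos hd, if_neg (by omega : ¬ doc.length ≤ 1)]
    by_cases hup : 1 < l.length
    · rw [if_pos hup]
      have hne : l ≠ [] := by
        intro hnil; rw [hnil] at hup; simp at hup
      have h := pvALoopGen doc l hne (l.length - 1) 0 (by omega) []
      simp only [List.drop_zero, List.nil_append, CharP.cast_eq_zero] at h
      rw [pvSliceNeg1, h]
      rw [if_pos (by rw [pvSegsOf_length', ← hl]; exact hup)]
      rw [pvSegsOf_eq_slices doc (hl ▸ hne), ← hl]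
    · rw [if_neg hup, if_neg (by rw [pvSegsOf_length', ← hl]; exact hup)]
  · rw [if_neg hd, if_pos (by omega)]

-- ===== VERDICT (by name: the statement is the Claim_ definition above) =====
theorem review_sent_tokenize_spec : Claim_equal_review_sent_tokenize := by
  intro review _
  show review_sent_tokenize review = review_sent_tokenize_alt review
  exact pvMain review
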